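-- pv_equiv track=rewrite | github.com/wCreATivew/Aphrodite-demo | rag_offline/replay_data.py | summarize_sessions
-- ===== SOURCE A (Python) =====
-- from typing import Any, Dict, Iterable, List, Optional
--
-- def summarize_sessions(sessions: Iterable[Dict[str, Any]]) -> Dict[str, Any]:
--     rows = list(sessions)
--     total = len(rows)
--     feedback_pos = sum(1 for x in rows if int(x.get("feedback_signal", 0)) > 0)
--     feedback_neg = sum(1 for x in rows if int(x.get("feedback_signal", 0)) < 0)
--     feedback_neu = total - feedback_pos - feedback_neg
--     retrieval_used = sum(1 for x in rows if bool(x.get("retrieval_used", False)))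
--     triplet_generated = sum(1 for x in rows if bool(x.get("triplet_generated", False)))
--     return {
--         "total": total,
--         "feedback_pos": feedback_pos,
--         "feedback_neg": feedback_neg,
--         "feedback_neu": feedback_neu,
--         "retrieval_used": retrieval_used,
--         "triplet_generated": triplet_generated,
--     }
-- ===== SOURCE B (Python) =====
-- def summarize_sessions(sessions):
--     total = feedback_pos = feedback_neg = retrieval_used = triplet_generated = 0
--     for x in sessions:
--         total += 1
--         s = int(x.get("feedback_signal", 0))
--         if s > 0:
--             feedback_pos += 1
--         elif s < 0:
--             feedback_neg += 1
--         if bool(x.get("retrieval_used", False)):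
--             retrieval_used += 1
--         if bool(x.get("triplet_generated", False)):
--             triplet_generated += 1
--     return {
--         "total": total,
--         "feedback_pos": feedback_pos,
--         "feedback_neg": feedback_neg,
--         "feedback_neu": total - feedback_pos - feedback_neg,
--         "retrieval_used": retrieval_used,
--         "triplet_generated": triplet_generated,
--     }
-- ===== Notes on version B (the rewrite author's own statement) =====
-- stated objective: alternative
-- what changed: Replaced A's five separate comprehension passes over the materialized row list with a single loop that maintains all counters at once and derives the neutral count at the end.
import Mathlib
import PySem

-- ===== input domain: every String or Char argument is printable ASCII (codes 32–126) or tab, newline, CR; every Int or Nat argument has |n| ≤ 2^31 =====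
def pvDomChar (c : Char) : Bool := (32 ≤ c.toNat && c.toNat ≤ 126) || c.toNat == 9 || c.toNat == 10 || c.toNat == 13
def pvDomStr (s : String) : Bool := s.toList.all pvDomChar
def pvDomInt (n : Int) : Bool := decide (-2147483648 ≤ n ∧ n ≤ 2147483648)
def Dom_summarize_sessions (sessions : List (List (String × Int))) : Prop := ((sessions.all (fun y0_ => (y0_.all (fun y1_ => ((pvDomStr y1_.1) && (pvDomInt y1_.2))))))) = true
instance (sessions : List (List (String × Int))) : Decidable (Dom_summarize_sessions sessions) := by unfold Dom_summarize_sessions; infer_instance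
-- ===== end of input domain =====

-- B replaces A's five separate passes over the rows with a single accumulating loop (objective: alternative decomposition).

-- ===== PORT A =====
def summarize_sessions (sessions : List (List (String × Int))) : List (String × Int) :=
  let rows := sessions
  let total : Int := rows.length
  let feedback_pos : Int := rows.foldl (fun acc x => if PySem.Dict.getD (PySem.Dict.mk x) "feedback_signal" 0 > 0 then acc + 1 else acc) 0
  let feedback_neg : Int := rows.foldl (fun acc x => if PySem.Dict.getD (PySem.Dict.mk x) "feedback_signal" 0 < 0 then acc + 1 else acc) 0
  let feedback_neu : Int := total - feedback_pos - feedback_neg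
  let retrieval_used : Int := rows.foldl (fun acc x => if PySem.Dict.getD (PySem.Dict.mk x) "retrieval_used" 0 ≠ 0 then acc + 1 else acc) 0
  let triplet_generated : Int := rows.foldl (fun acc x => if PySem.Dict.getD (PySem.Dict.mk x) "triplet_generated" 0 ≠ 0 then acc + 1 else acc) 0
  [("total", total), ("feedback_pos", feedback_pos), ("feedback_neg", feedback_neg),
   ("feedback_neu", feedback_neu), ("retrieval_used", retrieval_used), ("triplet_generated", triplet_generated)]

-- ===== PORT B =====
-- single pass: state (total, pos, neg, retrieval_used, triplet_generated)
def sumSessStep (st : Int × Int × Int × Int × Int) (x : List (String × Int)) : Int × Int × Int × Int × Int :=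
  let s := PySem.Dict.getD (PySem.Dict.mk x) "feedback_signal" 0
  let p := if s > 0 then st.2.1 + 1 else st.2.1
  let n := if ¬ (s > 0) ∧ s < 0 then st.2.2.1 + 1 else st.2.2.1
  let r := if PySem.Dict.getD (PySem.Dict.mk x) "retrieval_used" 0 ≠ 0 then st.2.2.2.1 + 1 else st.2.2.2.1
  let t := if PySem.Dict.getD (PySem.Dict.mk x) "triplet_generated" 0 ≠ 0 then st.2.2.2.2 + 1 else st.2.2.2.2
  (st.1 + 1, p, n, r, t)

def summarize_sessions_alt (sessions : List (List (String × Int))) : List (String × Int) :=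
  let st := sessions.foldl sumSessStep (0, 0, 0, 0, 0)
  [("total", st.1), ("feedback_pos", st.2.1), ("feedback_neg", st.2.2.1),
   ("feedback_neu", st.1 - st.2.1 - st.2.2.1), ("retrieval_used", st.2.2.2.1), ("triplet_generated", st.2.2.2.2)]

-- ===== PRECONDITION & SPEC =====
def Spec_summarize_sessions (sessions : List (List (String × Int))) (out : List (String × Int)) : Prop := out = summarize_sessions_alt sessions
instance (sessions : List (List (String × Int))) (out : List (String × Int)) : Decidable (Spec_summarize_sessions sessions out) := by unfold Spec_summarize_sessions; infer_instance

-- ===== CLAIM (what is proved, stated in full; the proofs are below) =====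
def Claim_equal_summarize_sessions : Prop := ∀ (sessions : List (List (String × Int))), Dom_summarize_sessions sessions → Spec_summarize_sessions sessions (summarize_sessions sessions)

-- ===== LEMMAS AND PROOFS =====

-- single-pass fold = tuple of the separate folds (loop fusion invariant)
theorem sumSess_fold (rows : List (List (String × Int))) (tt p n r t : Int) :
    rows.foldl sumSessStep (tt, p, n, r, t) =
      (tt + rows.length,
       rows.foldl (fun acc x => if PySem.Dict.getD (PySem.Dict.mk x) "feedback_signal" 0 > 0 then acc + 1 else acc) p,
       rows.foldl (fun acc x => if PySem.Dict.getD (PySem.Dict.mk x) "feedback_signal" 0 < 0 then acc + 1 else acc) n,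
       rows.foldl (fun acc x => if PySem.Dict.getD (PySem.Dict.mk x) "retrieval_used" 0 ≠ 0 then acc + 1 else acc) r,
       rows.foldl (fun acc x => if PySem.Dict.getD (PySem.Dict.mk x) "triplet_generated" 0 ≠ 0 then acc + 1 else acc) t) := by
  induction rows generalizing tt p n r t with
  | nil => simp
  | cons x xs ih =>
    simp only [List.foldl_cons, List.length_cons]
    rw [sumSessStep, ih]
    simp only [Prod.mk.injEq]
    refine ⟨by push_cast; ring, ?_⟩
    by_cases h : PySem.Dict.getD (PySem.Dict.mk x) "feedback_signal" 0 > 0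
    · simp [h, show ¬ (PySem.Dict.getD (PySem.Dict.mk x) "feedback_signal" 0 < 0) by omega]
    · simp [h]

-- ===== VERDICT (by name: the statement is the Claim_ definition above) =====
theorem summarize_sessions_spec : Claim_equal_summarize_sessions := by
  intro sessions _
  unfold Spec_summarize_sessions summarize_sessions summarize_sessions_alt
  rw [sumSess_fold]
  simp
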